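-- pv_equiv track=rewrite | github.com/SackOfHacks/pcapper | pcapper/threats.py | _collect_ot_command_hits
-- ===== SOURCE A (Python) =====
-- from collections import Counter, defaultdict
--
-- _OT_COMMAND_KEYWORDS: dict[str, str] = {
--     "plcstop": "critical",
--     "plccoldstart": "high",
--     "plchotstart": "high",
--     "stopdt": "high",
--     "startdt": "warning",
--     "stop": "high",
--     "start": "warning",
--     "restart": "high",
--     "reset": "high",
--     "download": "high",
--     "upload": "warning",
--     "program": "high",
--     "firmware": "critical",
--     "write": "warning",
--     "setpoint": "high",
--     "override": "high",
--     "control": "warning",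
--     "delete": "high",
--     "erase": "critical",
-- }
--
-- def _collect_ot_command_hits(commands: Counter[str]) -> tuple[Counter[str], str]:
--     hits: Counter[str] = Counter()
--     severity_rank = {"critical": 0, "high": 1, "warning": 2, "info": 3}
--     max_sev = "info"
--     for cmd, count in commands.items():
--         cmd_lower = str(cmd).lower()
--         for token, sev in _OT_COMMAND_KEYWORDS.items():
--             if token in cmd_lower:
--                 hits[cmd] += int(count)
--                 if severity_rank.get(sev, 99) < severity_rank.get(max_sev, 99):
--                     max_sev = sev
--                 break
--     return hits, max_sev
-- ===== SOURCE B (Python) =====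
-- from collections import Counter
--
-- _OT_COMMAND_KEYWORDS: dict[str, str] = {
--     "plcstop": "critical",
--     "plccoldstart": "high",
--     "plchotstart": "high",
--     "stopdt": "high",
--     "startdt": "warning",
--     "stop": "high",
--     "start": "warning",
--     "restart": "high",
--     "reset": "high",
--     "download": "high",
--     "upload": "warning",
--     "program": "high",
--     "firmware": "critical",
--     "write": "warning",
--     "setpoint": "high",
--     "override": "high",
--     "control": "warning",
--     "delete": "high",
--     "erase": "critical",
-- }
--
-- _SEVERITY_RANK = {"critical": 0, "high": 1, "warning": 2, "info": 3}
--
--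
-- def _collect_ot_command_hits(commands):
--     # Transposed traversal: keywords form the OUTER loop; a `matched` set marks
--     # commands already attributed, so each command counts for its first-matching
--     # token (tokens are scanned in dict order, so the first token that matches a
--     # command claims it -- same attribution as scanning tokens per command).
--     matched: set = set()
--     max_sev = "info"
--     for token, sev in _OT_COMMAND_KEYWORDS.items():
--         for cmd in commands:
--             if cmd not in matched and token in str(cmd).lower():
--                 matched.add(cmd)
--                 if _SEVERITY_RANK.get(sev, 99) < _SEVERITY_RANK.get(max_sev, 99):
--                     max_sev = sev
--     hits = Counter({cmd: int(cnt) for cmd, cnt in commands.items() if cmd in matched})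
--     return hits, max_sev
-- ===== Notes on version B (the rewrite author's own statement) =====
-- stated objective: alternative
-- what changed: Transposes the traversal: keywords become the OUTER loop over a maintained `matched` set of already-attributed commands (so each command is claimed by its first-matching token), and hits are then built in a separate filtering pass over commands; A instead scans all keywords per command with a break inside one stateful pass.
import Mathlib
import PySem

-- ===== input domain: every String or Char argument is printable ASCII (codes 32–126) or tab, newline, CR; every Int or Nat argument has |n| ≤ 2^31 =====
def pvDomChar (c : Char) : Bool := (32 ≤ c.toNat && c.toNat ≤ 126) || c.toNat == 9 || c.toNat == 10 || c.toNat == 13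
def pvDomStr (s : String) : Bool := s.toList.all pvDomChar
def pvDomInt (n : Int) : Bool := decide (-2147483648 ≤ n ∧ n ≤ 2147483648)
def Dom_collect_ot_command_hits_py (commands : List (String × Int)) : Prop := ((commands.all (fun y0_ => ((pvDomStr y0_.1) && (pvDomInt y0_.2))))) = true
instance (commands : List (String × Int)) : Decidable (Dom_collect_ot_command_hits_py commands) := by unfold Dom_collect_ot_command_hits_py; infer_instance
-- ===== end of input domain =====

-- B transposes the traversal: the keyword table is the OUTER loop over a maintained
-- `matched` set of already-attributed commands, and hits come from a final filtering
-- pass over commands; objective: alternative decomposition, same cost.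

-- shared module constants (present in both Python files)
def otKeywords : List (String × String) :=
  [("plcstop", "critical"), ("plccoldstart", "high"), ("plchotstart", "high"),
   ("stopdt", "high"), ("startdt", "warning"), ("stop", "high"), ("start", "warning"),
   ("restart", "high"), ("reset", "high"), ("download", "high"), ("upload", "warning"),
   ("program", "high"), ("firmware", "critical"), ("write", "warning"),
   ("setpoint", "high"), ("override", "high"), ("control", "warning"),
   ("delete", "high"), ("erase", "critical")]

-- severity_rank.get(s, 99) / _SEVERITY_RANK lookup (the four-entry dict, default 99)
def sevRank (s : String) : Int :=
  if s == "critical" then 0 else if s == "high" then 1 else if s == "warning" then 2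
  else if s == "info" then 3 else 99

-- ===== PORT A =====
-- Counter increment `hits[cmd] += count`: overwrite in place if present, else append (dict semantics)
def counterAdd (hits : List (String × Int)) (cmd : String) (count : Int) : List (String × Int) :=
  if hits.any (fun p => p.1 == cmd) then
    hits.map (fun p => if p.1 == cmd then (p.1, p.2 + count) else p)
  else hits ++ [(cmd, count)]

-- the inner `for token, sev in _OT_COMMAND_KEYWORDS.items(): … break`
def otInnerA (hits : List (String × Int)) (maxSev cmd lowCmd : String) (count : Int) :
    List (String × String) → (List (String × Int)) × String
  | [] => (hits, maxSev)
  | (token, sev) :: rest =>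
    if PySem.Str.isIn token lowCmd then
      let hits' := counterAdd hits cmd count
      let maxSev' := if sevRank sev < sevRank maxSev then sev else maxSev
      (hits', maxSev')
    else otInnerA hits maxSev cmd lowCmd count rest

def collect_ot_command_hits_py (commands : List (String × Int)) : (List (String × Int)) × String :=
  commands.foldl
    (fun (st : (List (String × Int)) × String) cv =>
      otInnerA st.1 st.2 cv.1 (PySem.Str.lower cv.1) cv.2 otKeywords)
    ([], "info")

-- ===== PORT B =====
-- body of B's inner `for cmd in commands:` loop (matched-set guard, add, running min-rank)
def otInnerB (token sev : String) (st : PySem.Set String × String) (cv : String × Int) :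
    PySem.Set String × String :=
  if !(PySem.Set.contains st.1 cv.1) && PySem.Str.isIn token (PySem.Str.lower cv.1) then
    (PySem.Set.add st.1 cv.1, if sevRank sev < sevRank st.2 then sev else st.2)
  else st

def collect_ot_command_hits_py_alt (commands : List (String × Int)) : (List (String × Int)) × String :=
  let st := otKeywords.foldl
    (fun st ks => commands.foldl (otInnerB ks.1 ks.2) st) (PySem.Set.empty, "info")
  (commands.filter (fun cv => PySem.Set.contains st.1 cv.1), st.2)

-- ===== PRECONDITION & SPEC =====
-- The Python argument is a Counter (a dict): its keys are distinct. Pre_ states exactly that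
-- for the association-list representation; it excludes no representable Python input.
def Pre_collect_ot_command_hits_py (commands : List (String × Int)) : Prop :=
  (commands.map Prod.fst).Nodup
instance (commands : List (String × Int)) : Decidable (Pre_collect_ot_command_hits_py commands) := by
  unfold Pre_collect_ot_command_hits_py; infer_instance

def pvWitness_collect_ot_command_hits_py : (List (String × Int)) :=
  [("plcstop", 2), ("hello", 1)]

def Spec_collect_ot_command_hits_py (commands : List (String × Int)) (out : (List (String × Int)) × String) : Prop := out = collect_ot_command_hits_py_alt commands
instance (commands : List (String × Int)) (out : (List (String × Int)) × String) : Decidable (Spec_collect_ot_command_hits_py commands out) := by unfold Spec_collect_ot_command_hits_py; infer_instance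

-- ===== CLAIM (what is proved, stated in full; the proofs are below) =====
def Claim_equal_collect_ot_command_hits_py : Prop := ∀ (commands : List (String × Int)), Dom_collect_ot_command_hits_py commands → Pre_collect_ot_command_hits_py commands → Spec_collect_ot_command_hits_py commands (collect_ot_command_hits_py commands)

-- ===== LEMMAS AND PROOFS =====

-- `sev if rank(sev) < rank(max_sev) else max_sev`, named for the proofs
def comb (m s : String) : String := if sevRank s < sevRank m then s else m

-- min-rank severity present among the three possible keyword severities
def minOf (c h w : Bool) : String :=
  if c then "critical" else if h then "high" else if w then "warning" else "info"

-- severity of the first keyword of kws contained in low, or none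
def firstKeywordSev (low : String) : List (String × String) → Option String
  | [] => none
  | (token, sev) :: rest =>
    if PySem.Str.isIn token low then some sev else firstKeywordSev low rest

def matchedSeverity (cmd : String) : Option String :=
  firstKeywordSev (PySem.Str.lower cmd) otKeywords

-- A's inner loop computes the first-matching severity and acts on it once.
theorem otInnerA_eq (kws : List (String × String)) (hits : List (String × Int))
    (maxSev cmd lowCmd : String) (count : Int) :
    otInnerA hits maxSev cmd lowCmd count kws =
      match firstKeywordSev lowCmd kws with
      | none => (hits, maxSev)
      | some sev => (counterAdd hits cmd count, comb maxSev sev) := by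
  induction kws with
  | nil => rfl
  | cons p rest ih =>
    obtain ⟨token, sev⟩ := p
    by_cases h : PySem.Chars.isIn token.toList lowCmd.toList = true
    · simp [otInnerA, firstKeywordSev, PySem.Str.isIn, h, comb]
    · simp [otInnerA, firstKeywordSev, PySem.Str.isIn, h, ih]

theorem counterAdd_absent (hits : List (String × Int)) (cmd : String) (count : Int)
    (h : cmd ∉ hits.map Prod.fst) :
    counterAdd hits cmd count = hits ++ [(cmd, count)] := by
  have : hits.any (fun p => p.1 == cmd) = false := by
    simp only [List.any_eq_false]
    intro p hp
    simp only [beq_iff_eq]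
    intro he
    exact h (List.mem_map.mpr ⟨p, hp, he⟩)
  simp [counterAdd, this]

-- the main invariant of A's outer loop
theorem foldA_eq (l : List (String × Int)) (h : List (String × Int)) (m : String)
    (hdisj : ∀ cv ∈ l, cv.1 ∉ h.map Prod.fst) (hnd : (l.map Prod.fst).Nodup) :
    l.foldl (fun (st : (List (String × Int)) × String) cv =>
        otInnerA st.1 st.2 cv.1 (PySem.Str.lower cv.1) cv.2 otKeywords) (h, m)
      = (h ++ l.filter (fun cv => (matchedSeverity cv.1).isSome),
         (l.filterMap (fun cv => matchedSeverity cv.1)).foldl comb m) := by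
  induction l generalizing h m with
  | nil => simp
  | cons cv t ih =>
    have hms : firstKeywordSev (PySem.Str.lower cv.1) otKeywords = matchedSeverity cv.1 := rfl
    rw [List.map_cons] at hnd
    have hnd' : (t.map Prod.fst).Nodup := hnd.of_cons
    have hcv : cv.1 ∉ t.map Prod.fst := (List.nodup_cons.mp hnd).1
    have hdisjt : ∀ x ∈ t, x.1 ∉ h.map Prod.fst :=
      fun x hx => hdisj x (List.mem_cons_of_mem _ hx)
    cases hm : matchedSeverity cv.1 with
    | none =>
      have hstep : otInnerA h m cv.1 (PySem.Str.lower cv.1) cv.2 otKeywords = (h, m) := by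
        rw [otInnerA_eq, hms, hm]
      simp only [List.foldl_cons]
      rw [hstep, ih h m hdisjt hnd']
      simp [hm]
    | some sev =>
      have habs : cv.1 ∉ h.map Prod.fst := hdisj cv (List.mem_cons_self)
      have hstep : otInnerA h m cv.1 (PySem.Str.lower cv.1) cv.2 otKeywords
          = (h ++ [(cv.1, cv.2)], comb m sev) := by
        rw [otInnerA_eq, hms, hm, counterAdd_absent h cv.1 cv.2 habs]
      have hdisj' : ∀ x ∈ t, x.1 ∉ (h ++ [(cv.1, cv.2)]).map Prod.fst := by
        intro x hx
        simp only [List.map_append, List.mem_append, List.map_cons, List.map_nil,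
          List.mem_singleton, not_or]
        refine ⟨hdisjt x hx, ?_⟩
        intro he
        exact hcv (by rw [← he]; exact List.mem_map.mpr ⟨x, hx, rfl⟩)
      simp only [List.foldl_cons]
      rw [hstep, ih (h ++ [(cv.1, cv.2)]) _ hdisj' hnd']
      simp [hm, List.append_assoc]

-- ----- severity bookkeeping: comb/minOf facts (finite case bashes) -----

theorem comb_key (m x : String)
    (hm : m = "critical" ∨ m = "high" ∨ m = "warning" ∨ m = "info")
    (hx : x = "critical" ∨ x = "high" ∨ x = "warning") (c h w : Bool) :
    comb (comb m x) (minOf c h w)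
      = comb m (minOf ((x == "critical") || c) ((x == "high") || h) ((x == "warning") || w)) := by
  rcases hm with rfl | rfl | rfl | rfl <;> rcases hx with rfl | rfl | rfl <;>
    cases c <;> cases h <;> cases w <;> decide

theorem comb_info (m : String)
    (hm : m = "critical" ∨ m = "high" ∨ m = "warning" ∨ m = "info") :
    comb m "info" = m := by
  rcases hm with rfl | rfl | rfl | rfl <;> decide

theorem comb_mem4 (m x : String)
    (hm : m = "critical" ∨ m = "high" ∨ m = "warning" ∨ m = "info")
    (hx : x = "critical" ∨ x = "high" ∨ x = "warning") :
    comb m x = "critical" ∨ comb m x = "high" ∨ comb m x = "warning" ∨ comb m x = "info" := by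
  rcases hm with rfl | rfl | rfl | rfl <;> rcases hx with rfl | rfl | rfl <;> decide

theorem comb_idem (m s : String) : comb (comb m s) s = comb m s := by
  unfold comb; split_ifs <;> rfl

theorem contains_cons_or (x s : String) (t : List String) :
    (x :: t).contains s = ((x == s) || t.contains s) := by
  rw [Bool.eq_iff_iff]
  simp only [List.contains_eq_mem, List.mem_cons, decide_eq_true_eq, Bool.or_eq_true,
    beq_iff_eq]
  constructor
  · rintro (h | h)
    · exact Or.inl h.symm
    · exact Or.inr (by simpa using h)
  · rintro (h | h)
    · exact Or.inl h.symm
    · exact Or.inr (by simpa using h)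

-- A's running min over a list of severities, as a function of which severities occur
theorem foldl_comb_minOf (l : List String)
    (hl : ∀ s ∈ l, s = "critical" ∨ s = "high" ∨ s = "warning") (m : String)
    (hm : m = "critical" ∨ m = "high" ∨ m = "warning" ∨ m = "info") :
    l.foldl comb m = comb m (minOf (l.contains "critical") (l.contains "high") (l.contains "warning")) := by
  induction l generalizing m with
  | nil =>
    rw [List.foldl_nil, show ([] : List String).contains "critical" = false from rfl,
      show ([] : List String).contains "high" = false from rfl,
      show ([] : List String).contains "warning" = false from rfl,
      show minOf false false false = "info" from rfl, comb_info m hm]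
  | cons x t ih =>
    have hx := hl x (by simp)
    have hlt : ∀ s ∈ t, s = "critical" ∨ s = "high" ∨ s = "warning" :=
      fun s hs => hl s (List.mem_cons_of_mem _ hs)
    rw [List.foldl_cons, ih hlt (comb m x) (comb_mem4 m x hm hx), comb_key m x hm hx,
      contains_cons_or, contains_cons_or, contains_cons_or]

-- contains over the filterMap of matched severities, as an any over commands
theorem contains_filterMap (l : List (String × Int)) (s : String) :
    (l.filterMap (fun cv => matchedSeverity cv.1)).contains s
      = l.any (fun cv => matchedSeverity cv.1 == some s) := by
  rw [Bool.eq_iff_iff]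
  simp only [List.contains_eq_mem, List.mem_filterMap, decide_eq_true_eq, List.any_eq_true,
    beq_iff_eq]

theorem firstKeywordSev_mem (kws : List (String × String)) (low s : String)
    (h : firstKeywordSev low kws = some s) : s ∈ kws.map Prod.snd := by
  induction kws with
  | nil => simp [firstKeywordSev] at h
  | cons p rest ih =>
    obtain ⟨token, sev⟩ := p
    by_cases hc : PySem.Chars.isIn token.toList low.toList = true
    · simp [firstKeywordSev, PySem.Str.isIn, hc] at h
      simp [h]
    · simp [firstKeywordSev, PySem.Str.isIn, hc] at h
      simp [ih h]

theorem matchedSeverity_mem3 (cmd s : String) (h : matchedSeverity cmd = some s) :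
    s = "critical" ∨ s = "high" ∨ s = "warning" := by
  have hmem := firstKeywordSev_mem _ _ _ h
  have h3 : ∀ x ∈ otKeywords.map Prod.snd, x = "critical" ∨ x = "high" ∨ x = "warning" := by decide
  exact h3 s hmem

theorem first_cons_isSome (low token sev : String) (kt : List (String × String)) :
    (firstKeywordSev low ((token, sev) :: kt)).isSome
      = (PySem.Str.isIn token low || (firstKeywordSev low kt).isSome) := by
  simp only [firstKeywordSev]
  split <;> simp_all

theorem first_cons_beq (low token sev s : String) (kt : List (String × String)) :
    (firstKeywordSev low ((token, sev) :: kt) == some s)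
      = ((PySem.Str.isIn token low && (sev == s))
          || (!(PySem.Str.isIn token low) && (firstKeywordSev low kt == some s))) := by
  simp only [firstKeywordSev]
  split <;> simp_all

-- ----- boolean any helpers -----

theorem any_or {a : Type} (l : List a) (p q : a → Bool) :
    l.any (fun x => p x || q x) = (l.any p || l.any q) := by
  induction l with
  | nil => rfl
  | cons x t ih =>
    simp only [List.any_cons, ih]
    cases p x <;> cases q x <;> simp

theorem any_and_const {a : Type} (l : List a) (b : Bool) (r : a → Bool) :
    l.any (fun x => b && r x) = (b && l.any r) := by
  cases b <;> simp

theorem any_congr_mem {a : Type} (l : List a) (p q : a → Bool)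
    (h : ∀ x ∈ l, p x = q x) : l.any p = l.any q := by
  induction l with
  | nil => rfl
  | cons x t ih =>
    simp only [List.any_cons, h x (by simp), ih (fun y hy => h y (List.mem_cons_of_mem _ hy))]

-- an any over keys that compares with a fixed member's key collapses pointwise
theorem any_key_eq {a : Type} (cs : List (String × a)) (cv : String × a) (hcv : cv ∈ cs)
    (f : String → Bool) : cs.any (fun cv' => (cv'.1 == cv.1) && f cv'.1) = f cv.1 := by
  cases hf : f cv.1
  · simp only [List.any_eq_false]
    intro cv' _
    by_cases he : cv'.1 = cv.1
    · simp [he, hf]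
    · simp [he]
  · exact List.any_eq_true.mpr ⟨cv, hcv, by simp [hf]⟩

-- ----- B's inner loop (one keyword over all commands) -----

theorem contains_false_iff (s : PySem.Set String) (x : String) :
    PySem.Set.contains s x = false ↔ x ∉ s := by
  rw [← PySem.Set.contains_iff]; simp

theorem otInnerB_contains (token sev : String) (cs : List (String × Int))
    (M : PySem.Set String) (m x : String) :
    PySem.Set.contains (cs.foldl (otInnerB token sev) (M, m)).1 x
      = (PySem.Set.contains M x
          || cs.any (fun cv => (cv.1 == x) && PySem.Str.isIn token (PySem.Str.lower cv.1))) := by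
  induction cs generalizing M m with
  | nil => simp
  | cons cv t ih =>
    simp only [List.foldl_cons, otInnerB, List.any_cons]
    by_cases hb : (!(PySem.Set.contains M cv.1) && PySem.Str.isIn token (PySem.Str.lower cv.1)) = true
    · rw [if_pos hb, ih]
      obtain ⟨hnm, hmatch⟩ := Bool.and_eq_true_iff.mp hb
      rw [Bool.eq_iff_iff]
      simp only [Bool.or_eq_true, Bool.and_eq_true, beq_iff_eq, hmatch, and_true,
        PySem.Set.contains_iff, PySem.Set.mem_add]
      tauto
    · rw [if_neg hb, ih]
      simp only [Bool.and_eq_true, Bool.not_eq_true', contains_false_iff, not_and] at hb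
      rw [Bool.eq_iff_iff]
      simp only [Bool.or_eq_true, Bool.and_eq_true, beq_iff_eq, PySem.Set.contains_iff]
      constructor
      · rintro (h | h)
        · exact Or.inl h
        · exact Or.inr (Or.inr h)
      · rintro (h | (⟨rfl, hIn⟩ | h))
        · exact Or.inl h
        · exact Or.inl (not_not.mp (fun hnm => hb hnm hIn))
        · exact Or.inr h

theorem otInnerB_snd (token sev : String) (cs : List (String × Int))
    (M : PySem.Set String) (m : String) :
    (cs.foldl (otInnerB token sev) (M, m)).2
      = if cs.any (fun cv => !(PySem.Set.contains M cv.1) && PySem.Str.isIn token (PySem.Str.lower cv.1))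
        then comb m sev else m := by
  induction cs generalizing M m with
  | nil => simp
  | cons cv t ih =>
    simp only [List.foldl_cons, otInnerB, List.any_cons]
    by_cases hb : (!(PySem.Set.contains M cv.1) && PySem.Str.isIn token (PySem.Str.lower cv.1)) = true
    · rw [if_pos hb, ih]
      simp only [hb, Bool.true_or, if_true]
      split
      · exact comb_idem m sev
      · rfl
    · rw [if_neg hb, ih]
      simp only [Bool.not_eq_true] at hb
      simp only [hb, Bool.false_or]

-- ----- B's outer loop over the keyword table -----

theorem outerB_spec (kws : List (String × String))
    (hkw : ∀ p ∈ kws, p.2 = "critical" ∨ p.2 = "high" ∨ p.2 = "warning")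
    (cs : List (String × Int)) (M : PySem.Set String) (m : String)
    (hm : m = "critical" ∨ m = "high" ∨ m = "warning" ∨ m = "info") :
    (∀ x, PySem.Set.contains (kws.foldl (fun st ks => cs.foldl (otInnerB ks.1 ks.2) st) (M, m)).1 x
        = (PySem.Set.contains M x
            || cs.any (fun cv => (cv.1 == x) && (firstKeywordSev (PySem.Str.lower cv.1) kws).isSome)))
    ∧ (kws.foldl (fun st ks => cs.foldl (otInnerB ks.1 ks.2) st) (M, m)).2
        = comb m (minOf
            (cs.any (fun cv => !(PySem.Set.contains M cv.1) && (firstKeywordSev (PySem.Str.lower cv.1) kws == some "critical")))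
            (cs.any (fun cv => !(PySem.Set.contains M cv.1) && (firstKeywordSev (PySem.Str.lower cv.1) kws == some "high")))
            (cs.any (fun cv => !(PySem.Set.contains M cv.1) && (firstKeywordSev (PySem.Str.lower cv.1) kws == some "warning")))) := by
  induction kws generalizing M m with
  | nil =>
    constructor
    · intro x; simp [firstKeywordSev]
    · simp only [List.foldl_nil, firstKeywordSev]
      rw [show (cs.any fun cv => !M.contains cv.1 && ((none : Option String) == some "critical")) = false by simp,
        show (cs.any fun cv => !M.contains cv.1 && ((none : Option String) == some "high")) = false by simp,
        show (cs.any fun cv => !M.contains cv.1 && ((none : Option String) == some "warning")) = false by simp,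
        show minOf false false false = "info" from rfl, comb_info m hm]
  | cons ks kt ih =>
    obtain ⟨tok, sev⟩ := ks
    have hsev : sev = "critical" ∨ sev = "high" ∨ sev = "warning" := hkw (tok, sev) (by simp)
    have hkt : ∀ p ∈ kt, p.2 = "critical" ∨ p.2 = "high" ∨ p.2 = "warning" :=
      fun p hp => hkw p (List.mem_cons_of_mem _ hp)
    have hP2 := otInnerB_snd tok sev cs M m
    have hm' : (cs.foldl (otInnerB tok sev) (M, m)).2 = "critical"
        ∨ (cs.foldl (otInnerB tok sev) (M, m)).2 = "high"
        ∨ (cs.foldl (otInnerB tok sev) (M, m)).2 = "warning"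
        ∨ (cs.foldl (otInnerB tok sev) (M, m)).2 = "info" := by
      rw [hP2]; split
      · exact comb_mem4 m sev hm hsev
      · exact hm
    obtain ⟨ihc, ihs⟩ := ih hkt (cs.foldl (otInnerB tok sev) (M, m)).1
      (cs.foldl (otInnerB tok sev) (M, m)).2 hm'
    have c1 : ∀ x, PySem.Set.contains
        (kt.foldl (fun st ks => cs.foldl (otInnerB ks.1 ks.2) st) (cs.foldl (otInnerB tok sev) (M, m))).1 x
        = (PySem.Set.contains (cs.foldl (otInnerB tok sev) (M, m)).1 x
            || cs.any (fun cv => (cv.1 == x) && (firstKeywordSev (PySem.Str.lower cv.1) kt).isSome)) := ihc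
    have c2 : (kt.foldl (fun st ks => cs.foldl (otInnerB ks.1 ks.2) st) (cs.foldl (otInnerB tok sev) (M, m))).2
        = comb (cs.foldl (otInnerB tok sev) (M, m)).2 (minOf
            (cs.any (fun cv => !(PySem.Set.contains (cs.foldl (otInnerB tok sev) (M, m)).1 cv.1) && (firstKeywordSev (PySem.Str.lower cv.1) kt == some "critical")))
            (cs.any (fun cv => !(PySem.Set.contains (cs.foldl (otInnerB tok sev) (M, m)).1 cv.1) && (firstKeywordSev (PySem.Str.lower cv.1) kt == some "high")))
            (cs.any (fun cv => !(PySem.Set.contains (cs.foldl (otInnerB tok sev) (M, m)).1 cv.1) && (firstKeywordSev (PySem.Str.lower cv.1) kt == some "warning")))) := ihs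
    have hCrw : ∀ s : String,
        cs.any (fun cv => !(PySem.Set.contains (cs.foldl (otInnerB tok sev) (M, m)).1 cv.1)
            && (firstKeywordSev (PySem.Str.lower cv.1) kt == some s))
        = cs.any (fun cv => ((!(PySem.Set.contains M cv.1) && !(PySem.Str.isIn tok (PySem.Str.lower cv.1)))
            && (firstKeywordSev (PySem.Str.lower cv.1) kt == some s))) := by
      intro s
      apply any_congr_mem
      intro cv hcv
      rw [otInnerB_contains tok sev cs M m cv.1,
        any_key_eq cs cv hcv (fun k => PySem.Str.isIn tok (PySem.Str.lower k)), Bool.not_or]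
    have hCons : ∀ s : String,
        cs.any (fun cv => !(PySem.Set.contains M cv.1)
            && (firstKeywordSev (PySem.Str.lower cv.1) ((tok, sev) :: kt) == some s))
        = (((sev == s) && cs.any (fun cv => !(PySem.Set.contains M cv.1) && PySem.Str.isIn tok (PySem.Str.lower cv.1)))
            || cs.any (fun cv => ((!(PySem.Set.contains M cv.1) && !(PySem.Str.isIn tok (PySem.Str.lower cv.1)))
                && (firstKeywordSev (PySem.Str.lower cv.1) kt == some s)))) := by
      intro s
      rw [show (fun cv : String × Int => !(PySem.Set.contains M cv.1)
            && (firstKeywordSev (PySem.Str.lower cv.1) ((tok, sev) :: kt) == some s))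
          = (fun cv : String × Int => ((sev == s) && (!(PySem.Set.contains M cv.1) && PySem.Str.isIn tok (PySem.Str.lower cv.1)))
            || ((!(PySem.Set.contains M cv.1) && !(PySem.Str.isIn tok (PySem.Str.lower cv.1)))
                && (firstKeywordSev (PySem.Str.lower cv.1) kt == some s))) from funext (fun cv => by
          rw [first_cons_beq]
          cases PySem.Set.contains M cv.1 <;> cases PySem.Str.isIn tok (PySem.Str.lower cv.1) <;>
            cases (firstKeywordSev (PySem.Str.lower cv.1) kt == some s) <;> cases (sev == s) <;> rfl),
        any_or, any_and_const]
    constructor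
    · intro x
      rw [List.foldl_cons, c1 x, otInnerB_contains tok sev cs M m x]
      simp only [first_cons_isSome, Bool.and_or_distrib_left, any_or, Bool.or_assoc]
    · rw [List.foldl_cons, c2, hCrw, hCrw, hCrw, hP2, hCons, hCons, hCons]
      by_cases hbN : cs.any (fun cv => !(PySem.Set.contains M cv.1)
          && PySem.Str.isIn tok (PySem.Str.lower cv.1)) = true
      · rw [if_pos hbN]
        simp only [hbN, Bool.and_true]
        exact comb_key m sev hm hsev _ _ _
      · rw [if_neg hbN]
        simp only [Bool.not_eq_true] at hbN
        simp only [hbN, Bool.and_false, Bool.false_or]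

-- ===== VERDICT (by name: the statement is the Claim_ definition above) =====
theorem collect_ot_command_hits_py_spec : Claim_equal_collect_ot_command_hits_py := by
  intro commands _ hpre
  unfold Spec_collect_ot_command_hits_py
  unfold collect_ot_command_hits_py collect_ot_command_hits_py_alt
  rw [foldA_eq commands [] "info" (by simp) hpre]
  have hkw3 : ∀ p ∈ otKeywords, p.2 = "critical" ∨ p.2 = "high" ∨ p.2 = "warning" := by decide
  obtain ⟨c1, c2⟩ := outerB_spec otKeywords hkw3 commands PySem.Set.empty "info"
    (Or.inr (Or.inr (Or.inr rfl)))
  show _ = (commands.filter _, _)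
  refine Prod.ext_iff.mpr ⟨?_, ?_⟩
  · show [] ++ commands.filter (fun cv => (matchedSeverity cv.1).isSome)
        = commands.filter (fun cv => PySem.Set.contains
            (otKeywords.foldl (fun st ks => commands.foldl (otInnerB ks.1 ks.2) st) (PySem.Set.empty, "info")).1 cv.1)
    rw [List.nil_append]
    refine (List.filter_congr ?_)
    intro cv hcv
    rw [c1 cv.1, any_key_eq commands cv hcv
      (fun k => (firstKeywordSev (PySem.Str.lower k) otKeywords).isSome)]
    rfl
  · show (commands.filterMap (fun cv => matchedSeverity cv.1)).foldl comb "info"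
        = (otKeywords.foldl (fun st ks => commands.foldl (otInnerB ks.1 ks.2) st) (PySem.Set.empty, "info")).2
    have hl3 : ∀ s ∈ commands.filterMap (fun cv => matchedSeverity cv.1),
        s = "critical" ∨ s = "high" ∨ s = "warning" := by
      intro s hs
      obtain ⟨cv, _, hcv⟩ := List.mem_filterMap.mp hs
      exact matchedSeverity_mem3 cv.1 s hcv
    rw [foldl_comb_minOf _ hl3 "info" (Or.inr (Or.inr (Or.inr rfl))), c2,
      contains_filterMap, contains_filterMap, contains_filterMap]
    have hsame : ∀ s : String, commands.any (fun cv => matchedSeverity cv.1 == some s)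
        = commands.any (fun cv => !(PySem.Set.contains PySem.Set.empty cv.1)
            && (firstKeywordSev (PySem.Str.lower cv.1) otKeywords == some s)) := by
      intro s
      apply any_congr_mem
      intro cv _
      rfl
    rw [hsame, hsame, hsame]
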